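-- pv_equiv track=rewrite | github.com/solbiko/algorithm | 프로그래머스/lv3/70130. 스타 수열/스타 수열.py | solution
-- ===== SOURCE A (Python) =====
-- from collections import Counter
--
-- def solution(a):
--     answer = 0
--
--     if len(a) <= 1:
--         return 0
--
--     c = {i: v for i, v in Counter(a).most_common()}
--
--     for i in c:
--         if c[i]*2 <= answer: # i의 등장 횟수가 공통인자 횟수 이하
--             continue
--         cnt = 0
--         idx = 0
--         while idx < len(a)-1:
--             if (a[idx]!=i and a[idx+1]!=i) or a[idx] == a[idx+1]:
--                 # 집합에 두 값 모두 i가 아님, 집합에 두 값이 같음 -> 스타수열 X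
--                 idx += 1
--                 continue
--             cnt+=2
--             idx+=2
--
--         answer = max(answer, cnt)
--
--     return answer
-- ===== SOURCE B (Python) =====
-- def solution(a):
--     n = len(a)
--     pos = {}
--     for idx, v in enumerate(a):
--         pos.setdefault(v, []).append(idx)
--     best = 0
--     for v, ps in pos.items():
--         cur = 0
--         cnt = 0
--         for p in ps:
--             if cur < p:          # pair (p-1, p): left neighbour is not v
--                 cnt += 2
--                 cur = p + 1
--             elif p + 1 < n and a[p + 1] != v:   # pair (p, p+1)
--                 cnt += 2
--                 cur = p + 2
--             else:                # this occurrence cannot be paired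
--                 cur = p + 1
--         best = max(best, cnt)
--     return best
-- ===== Notes on version B (the rewrite author's own statement) =====
-- stated objective: faster
-- what changed: A rescans the whole array once per distinct value (with a pruning shortcut); B builds each value's occurrence-position list in one pass over the array and runs the per-candidate greedy walk over those positions only, so total work is O(n + sum of occurrence-list lengths) = O(n).
import Mathlib
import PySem

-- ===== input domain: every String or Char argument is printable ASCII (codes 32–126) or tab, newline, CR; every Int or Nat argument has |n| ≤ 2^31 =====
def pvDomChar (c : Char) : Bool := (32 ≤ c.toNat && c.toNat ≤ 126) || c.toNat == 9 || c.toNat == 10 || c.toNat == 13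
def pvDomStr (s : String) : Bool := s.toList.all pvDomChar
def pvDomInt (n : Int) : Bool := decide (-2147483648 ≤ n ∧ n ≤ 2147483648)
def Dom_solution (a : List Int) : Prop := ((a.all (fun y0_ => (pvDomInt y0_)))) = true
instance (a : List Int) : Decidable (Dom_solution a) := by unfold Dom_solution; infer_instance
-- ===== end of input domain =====

-- B replaces A's per-candidate rescans of the whole array by one pass building each value's
-- occurrence-position list, then a per-candidate greedy walk over those positions only.

-- ===== PORT A =====
-- the inner 'while idx < len(a)-1' loop of A; a[idx] / a[idx+1] are always in range where read,
-- so pyGetD with default 0 is exact.  fuel is only a totality guard: idx grows by at least 1 per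
-- iteration, so any fuel ≥ len(a)-1-idx makes the recursion identical to the Python loop
def solLoop (a : List Int) (i : Int) : Nat → Int → Int → Int
  | 0, _, cnt => cnt
  | fuel + 1, idx, cnt =>
    if idx < (a.length : Int) - 1 then
      if (PySem.List.pyGetD a idx 0 ≠ i ∧ PySem.List.pyGetD a (idx + 1) 0 ≠ i)
          ∨ PySem.List.pyGetD a idx 0 = PySem.List.pyGetD a (idx + 1) 0 then
        solLoop a i fuel (idx + 1) cnt
      else
        solLoop a i fuel (idx + 2) (cnt + 2)
    else cnt

-- the 'for i in c' loop of A over the dict c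
def solOuter (a : List Int) (c : PySem.Dict Int Int) : Int :=
  c.keys.foldl (fun answer i =>
    if c.getD i 0 * 2 ≤ answer then answer
    else max answer (solLoop a i a.length 0 0)) 0

def solution (a : List Int) : Int :=
  if a.length ≤ 1 then 0
  else
    -- c = {i: v for i, v in Counter(a).most_common()}  (most_common = stable sort by count, descending)
    solOuter a ((PySem.List.sorted (PySem.Dict.counter a).items (fun p => p.2) true).foldl
      (fun d p => d.insert p.1 p.2) PySem.Dict.empty)

-- ===== PORT B =====
-- one step of B's 'for p in ps' loop; state = (cur, cnt)
def altInner (a : List Int) (v : Int) (s : Int × Int) (p : Int) : Int × Int :=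
  if s.1 < p then (p + 1, s.2 + 2)
  else if p + 1 < (a.length : Int) ∧ PySem.List.pyGetD a (p + 1) 0 ≠ v then (p + 2, s.2 + 2)
  else (p + 1, s.2)

def solution_alt (a : List Int) : Int :=
  ((PySem.List.enumerate a).foldl
      (fun d p => d.modify p.2 [] (fun l => l ++ [p.1])) PySem.Dict.empty).items.foldl
    (fun best vps => max best (vps.2.foldl (altInner a vps.1) (0, 0)).2) 0

-- ===== PRECONDITION & SPEC =====
def Spec_solution (a : List Int) (out : Int) : Prop := out = solution_alt a
instance (a : List Int) (out : Int) : Decidable (Spec_solution a out) := by unfold Spec_solution; infer_instance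

-- ===== CLAIM (what is proved, stated in full; the proofs are below) =====
def Claim_equal_solution : Prop := ∀ (a : List Int), Dom_solution a → Spec_solution a (solution a)

-- ===== LEMMAS AND PROOFS =====

def posl (a : List Int) (v : Int) : List Int :=
  ((PySem.List.enumerate a).filter (fun p => p.2 == v)).map (fun p => p.1)

lemma posl_eq_filter_range (a : List Int) (v : Int) :
    posl a v = (PySem.List.pyRange 0 (a.length : Int)).filter
      (fun j => PySem.List.pyGetD a j 0 == v) := by
  unfold posl
  rw [PySem.List.enumerate_eq_map_pyRange a 0, List.filter_map, List.map_map]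
  simp [Function.comp_def, PySem.List.len]

lemma mem_posl {a : List Int} {v j : Int} :
    j ∈ posl a v ↔ 0 ≤ j ∧ j < (a.length : Int) ∧ PySem.List.pyGetD a j 0 = v := by
  rw [posl_eq_filter_range]
  simp [List.mem_filter, PySem.List.mem_pyRange_one, and_assoc]

lemma posl_pairwise (a : List Int) (v : Int) : (posl a v).Pairwise (· < ·) := by
  rw [posl_eq_filter_range]
  apply List.Pairwise.filter
  rw [PySem.List.pyRange_one, List.pairwise_map]
  exact (List.pairwise_lt_range).imp (by intro a b h; omega)

lemma count_range (v : Int) : ∀ (a : List Int),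
    ((List.range a.length).filter (fun k => a.getD k 0 == v)).length = a.count v := by
  intro a; induction a with
  | nil => simp
  | cons x t ih =>
    rw [List.length_cons, List.range_succ_eq_map, List.filter_cons, List.filter_map]
    have h2 : ((List.range t.length).filter ((fun k => (x :: t).getD k 0 == v) ∘ Nat.succ))
        = (List.range t.length).filter (fun k => t.getD k 0 == v) := by
      apply List.filter_congr; intro k _; rfl
    rw [h2, show (x :: t).getD 0 0 = x from rfl]
    by_cases hx : x = v
    · subst hx; rw [if_pos (by simp), List.count_cons_self, List.length_cons, List.length_map, ih]
    · rw [if_neg (by simpa using hx), List.count_cons_of_ne (by exact hx), List.length_map, ih]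

lemma posl_length (a : List Int) (v : Int) : (posl a v).length = a.count v := by
  rw [posl_eq_filter_range, PySem.List.pyRange_one]
  have h1 : ((a.length : Int) - 0).toNat = a.length := by omega
  rw [h1, List.filter_map, List.length_map,
    List.filter_congr (q := fun k => a.getD k 0 == v)
      (by intro k hk; simp [PySem.List.pyGetD_natCast]), count_range]

lemma scan_done (a : List Int) (v : Int) (f : Nat) (idx cnt : Int)
    (h : ¬ idx < (a.length : Int) - 1) : solLoop a v f idx cnt = cnt := by
  cases f with
  | zero => rfl
  | succ f => simp only [solLoop]; rw [if_neg h]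

-- the loop result does not depend on the fuel once the fuel covers the remaining iterations
lemma scan_fuel (a : List Int) (v : Int) :
    ∀ (f1 f2 : Nat) (idx cnt : Int),
      ((a.length : Int) - 1 - idx).toNat ≤ f1 → ((a.length : Int) - 1 - idx).toNat ≤ f2 →
      solLoop a v f1 idx cnt = solLoop a v f2 idx cnt := by
  intro f1
  induction f1 with
  | zero =>
    intro f2 idx cnt h1 _
    rw [scan_done a v 0 idx cnt (by omega), scan_done a v f2 idx cnt (by omega)]
  | succ f1 ih =>
    intro f2 idx cnt h1 h2
    by_cases hlt : idx < (a.length : Int) - 1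
    · cases f2 with
      | zero => exact absurd hlt (by omega)
      | succ f2 =>
        simp only [solLoop]
        rw [if_pos hlt, if_pos hlt]
        by_cases hc : (PySem.List.pyGetD a idx 0 ≠ v ∧ PySem.List.pyGetD a (idx + 1) 0 ≠ v)
            ∨ PySem.List.pyGetD a idx 0 = PySem.List.pyGetD a (idx + 1) 0
        · rw [if_pos hc, if_pos hc]; exact ih f2 _ _ (by omega) (by omega)
        · rw [if_neg hc, if_neg hc]; exact ih f2 _ _ (by omega) (by omega)
    · rw [scan_done a v _ idx cnt hlt, scan_done a v f2 idx cnt hlt]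

-- the scan finds nothing when no occurrence of v is left
lemma scan_stop (a : List Int) (v : Int) :
    ∀ (fuel : Nat) (cur cnt : Int),
      (∀ j, cur ≤ j → j < (a.length : Int) → PySem.List.pyGetD a j 0 ≠ v) →
      solLoop a v fuel cur cnt = cnt := by
  intro fuel
  induction fuel with
  | zero => intro cur cnt _; rfl
  | succ f ih =>
    intro cur cnt hno
    by_cases hlt : cur < (a.length : Int) - 1
    · simp only [solLoop]
      rw [if_pos hlt, if_pos (Or.inl ⟨hno cur le_rfl (by omega), hno (cur+1) (by omega) (by omega)⟩)]
      exact ih (cur+1) cnt (fun j h1 h2 => hno j (by omega) h2)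
    · exact scan_done a v _ cur cnt hlt

-- the scan skips forward to just before the next occurrence
lemma scan_skip (a : List Int) (v : Int) (t : Int) (ht : t < (a.length : Int)) :
    ∀ (fuel : Nat) (cur cnt : Int), ((a.length : Int) - 1 - cur).toNat ≤ fuel → cur ≤ t - 1 →
      (∀ j, cur ≤ j → j < t → PySem.List.pyGetD a j 0 ≠ v) →
      solLoop a v fuel cur cnt = solLoop a v fuel (t - 1) cnt := by
  intro fuel
  induction fuel with
  | zero =>
    intro cur cnt hf hle _
    exact absurd hf (by omega)
  | succ f ih =>
    intro cur cnt hf hle hno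
    by_cases hcur : cur = t - 1
    · rw [hcur]
    · simp only [solLoop]
      rw [if_pos (by omega),
        if_pos (Or.inl ⟨hno cur le_rfl (by omega), hno (cur+1) (by omega) (by omega)⟩)]
      rw [ih (cur+1) cnt (by omega) (by omega) (fun j h1 h2 => hno j (by omega) h2)]
      rw [scan_fuel a v f (f+1) (t-1) cnt (by omega) (by omega)]
      simp only [solLoop]

-- core: A's scan from cur equals B's walk over the occurrences ≥ cur
lemma scan_eq (a : List Int) (v : Int) :
    ∀ (ps : List Int) (fuel : Nat) (cur cnt : Int),
      ((a.length : Int) - 1 - cur).toNat ≤ fuel →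
      (∀ p ∈ ps, cur ≤ p ∧ p < (a.length : Int) ∧ PySem.List.pyGetD a p 0 = v) →
      ps.Pairwise (· < ·) →
      (∀ j, cur ≤ j → j < (a.length : Int) → PySem.List.pyGetD a j 0 = v → j ∈ ps) →
      solLoop a v fuel cur cnt = (ps.foldl (altInner a v) (cur, cnt)).2 := by
  intro ps
  induction ps with
  | nil =>
    intro fuel cur cnt _ _ _ hcomp
    simp only [List.foldl_nil]
    exact scan_stop a v fuel cur cnt
      (fun j h1 h2 hv => by exact absurd (hcomp j h1 h2 hv) (List.not_mem_nil))
  | cons p rest ih =>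
    intro fuel cur cnt hf hmem hpw hcomp
    obtain ⟨hcp, hpn, hpv⟩ := hmem p List.mem_cons_self
    have hrest_gt : ∀ q ∈ rest, p < q := (List.pairwise_cons.mp hpw).1
    have hpw' := (List.pairwise_cons.mp hpw).2
    simp only [List.foldl_cons]
    by_cases hc : cur < p
    · -- pair (p-1, p) is taken
      have hnov : ∀ j, cur ≤ j → j < p → PySem.List.pyGetD a j 0 ≠ v := by
        intro j h1 h2 hv
        rcases List.mem_cons.mp (hcomp j h1 (by omega) hv) with h | h
        · omega
        · exact absurd (hrest_gt j h) (by omega)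
      rw [scan_skip a v p hpn fuel cur cnt hf (by omega) hnov]
      cases fuel with
      | zero => exact absurd hf (by omega)
      | succ f =>
        simp only [solLoop]
        rw [if_pos (by omega),
          show p - 1 + 1 = p from by omega, show p - 1 + 2 = p + 1 from by omega,
          if_neg (by
            rw [not_or]
            exact ⟨fun hh => hh.2 hpv,
                   fun hh => hnov (p-1) (by omega) (by omega) (by rw [hh]; exact hpv)⟩)]
        have hstep : altInner a v (cur, cnt) p = (p + 1, cnt + 2) := by
          simp only [altInner]; rw [if_pos hc]
        rw [hstep]
        exact ih f (p+1) (cnt+2) (by omega)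
          (fun q hq => ⟨by have := hrest_gt q hq; omega, (hmem q (List.mem_cons_of_mem _ hq)).2⟩)
          hpw'
          (fun j h1 h2 hv => by
            rcases List.mem_cons.mp (hcomp j (by omega) h2 hv) with h | h
            · exact absurd h (by omega)
            · exact h)
    · have hcurp : p = cur := by omega
      subst hcurp
      by_cases hp1 : p < (a.length : Int) - 1
      · cases fuel with
        | zero => exact absurd hf (by omega)
        | succ f =>
          simp only [solLoop]
          rw [if_pos hp1]
          by_cases hv1 : PySem.List.pyGetD a (p + 1) 0 = v
          · -- a[p+1] == v : this occurrence cannot be paired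
            rw [if_pos (Or.inr (hpv.trans hv1.symm))]
            have hstep : altInner a v (p, cnt) p = (p + 1, cnt) := by
              simp only [altInner]
              rw [if_neg (by omega), if_neg (by intro hh; exact hh.2 hv1)]
            rw [hstep]
            exact ih f (p+1) cnt (by omega)
              (fun q hq => ⟨by have := hrest_gt q hq; omega, (hmem q (List.mem_cons_of_mem _ hq)).2⟩)
              hpw'
              (fun j h1 h2 hv => by
                rcases List.mem_cons.mp (hcomp j (by omega) h2 hv) with h | h
                · exact absurd h (by omega)
                · exact h)
          · -- a[p+1] != v : pair (p, p+1) is taken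
            rw [if_neg (by
              rw [not_or]
              exact ⟨fun hh => hh.1 hpv, fun hh => hv1 (by rw [← hh]; exact hpv)⟩)]
            have hstep : altInner a v (p, cnt) p = (p + 2, cnt + 2) := by
              simp only [altInner]
              rw [if_neg (by omega), if_pos ⟨by omega, hv1⟩]
            rw [hstep]
            exact ih f (p+2) (cnt+2) (by omega)
              (fun q hq => by
                have h1 := hrest_gt q hq
                have h2 := (hmem q (List.mem_cons_of_mem _ hq)).2
                refine ⟨?_, h2⟩
                rcases eq_or_lt_of_le (show p + 1 ≤ q from by omega) with h | h
                · exact absurd (h ▸ h2.2) hv1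
                · omega)
              hpw'
              (fun j h1 h2 hv => by
                rcases List.mem_cons.mp (hcomp j (by omega) h2 hv) with h | h
                · exact absurd h (by omega)
                · exact h)
      · -- p = len - 1 : the loop is over and rest is empty
        have hrest_nil : rest = [] := by
          cases rest with
          | nil => rfl
          | cons q r =>
            have h1 := hrest_gt q List.mem_cons_self
            have h2 := (hmem q (List.mem_cons_of_mem _ List.mem_cons_self)).2.1
            exact absurd h1 (by omega)
        subst hrest_nil
        have hstep : altInner a v (p, cnt) p = (p + 1, cnt) := by
          simp only [altInner]
          rw [if_neg (by omega), if_neg (by intro hh; exact absurd hh.1 (by omega))]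
        rw [hstep]
        simp only [List.foldl_nil]
        exact scan_done a v fuel p cnt hp1

lemma scan_eq_top (a : List Int) (v : Int) :
    solLoop a v a.length 0 0 = ((posl a v).foldl (altInner a v) (0, 0)).2 := by
  apply scan_eq a v (posl a v) a.length 0 0 (by omega)
  · intro p hp
    have h := mem_posl.mp hp
    exact ⟨h.1, h.2.1, h.2.2⟩
  · exact posl_pairwise a v
  · intro j h1 h2 hv
    exact mem_posl.mpr ⟨h1, h2, hv⟩

lemma inner_le (a : List Int) (v : Int) :
    ∀ (ps : List Int) (cur cnt : Int),
      (ps.foldl (altInner a v) (cur, cnt)).2 ≤ cnt + 2 * (ps.length : Int) := by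
  intro ps
  induction ps with
  | nil => intro cur cnt; simp
  | cons p rest ih =>
    intro cur cnt
    simp only [List.foldl_cons, List.length_cons]
    have h1 := ih (altInner a v (cur, cnt) p).1 (altInner a v (cur, cnt) p).2
    rw [Prod.mk.eta] at h1
    have h2 : (altInner a v (cur, cnt) p).2 ≤ cnt + 2 := by
      simp only [altInner]; split_ifs <;> simp
    push_cast at h1 ⊢
    omega

lemma g_le (a : List Int) (v : Int) : solLoop a v a.length 0 0 ≤ 2 * (a.count v : Int) := by
  rw [scan_eq_top]
  have h := inner_le a v (posl a v) 0 0
  rw [posl_length] at h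
  omega

lemma prune (g h : Int → Int) :
    ∀ (l : List Int) (init : Int), (∀ i ∈ l, g i ≤ h i) →
      l.foldl (fun ans i => if h i ≤ ans then ans else max ans (g i)) init =
      l.foldl (fun ans i => max ans (g i)) init := by
  intro l
  induction l with
  | nil => intro init _; rfl
  | cons x t ih =>
    intro init hle
    simp only [List.foldl_cons]
    by_cases hx : h x ≤ init
    · rw [if_pos hx,
        show max init (g x) = init from
          max_eq_left ((hle x List.mem_cons_self).trans hx)]
      exact ih init (fun i hi => hle i (List.mem_cons_of_mem _ hi))
    · rw [if_neg hx]
      exact ih _ (fun i hi => hle i (List.mem_cons_of_mem _ hi))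

lemma foldl_max_perm (g : Int → Int) {l₁ l₂ : List Int} (h : l₁.Perm l₂) :
    ∀ init : Int, l₁.foldl (fun ans i => max ans (g i)) init =
      l₂.foldl (fun ans i => max ans (g i)) init := by
  induction h with
  | nil => intro init; rfl
  | cons x _ ih => intro init; simp only [List.foldl_cons]; exact ih _
  | swap x y l =>
    intro init
    simp only [List.foldl_cons]
    rw [max_right_comm]
  | trans _ _ ih1 ih2 => intro init; rw [ih1, ih2]

lemma foldl_max_eq_self (g : Int → Int) :
    ∀ (l : List Int) (init : Int), (∀ i ∈ l, g i ≤ init) →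
      l.foldl (fun ans i => max ans (g i)) init = init := by
  intro l
  induction l with
  | nil => intro init _; rfl
  | cons x t ih =>
    intro init hle
    simp only [List.foldl_cons]
    rw [max_eq_left (hle x List.mem_cons_self)]
    exact ih init (fun i hi => hle i (List.mem_cons_of_mem _ hi))

lemma map_snd_enum : ∀ (a : List Int) (s : Int),
    ((PySem.List.enumerate a s).map (fun p => p.2)) = a := by
  intro a
  induction a with
  | nil => intro s; rfl
  | cons x t ih => intro s; rw [PySem.List.enumerate_cons]; simp [ih]

-- B's program as a fold of max over the distinct values of a
lemma alt_eq (a : List Int) :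
    solution_alt a = (PySem.Set.ofList a).foldl (fun ans i => max ans (solLoop a i a.length 0 0)) 0 := by
  unfold solution_alt
  have hkeys : ((PySem.List.enumerate a).foldl
      (fun d p => d.modify p.2 [] (fun l => l ++ [p.1])) PySem.Dict.empty).keys
      = PySem.Set.ofList a := by
    rw [PySem.Dict.keys_foldl_modify_key (PySem.List.enumerate a) (fun p => p.2) []
      (fun _ p l => l ++ [p.1]) PySem.Dict.empty]
    rw [show (PySem.Dict.empty : PySem.Dict Int (List Int)).keys = [] from rfl,
      PySem.Set.update_nil_left, map_snd_enum]
  have hnodup : ((PySem.List.enumerate a).foldl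
      (fun d p => d.modify p.2 [] (fun l => l ++ [p.1])) PySem.Dict.empty).keys.Nodup := by
    rw [hkeys]; exact PySem.Set.nodup_ofList a
  have hgetD : ∀ v, ((PySem.List.enumerate a).foldl
      (fun d p => d.modify p.2 [] (fun l => l ++ [p.1])) PySem.Dict.empty).getD v []
      = posl a v := by
    intro v
    rw [← List.foldl_map (f := fun p : Int × Int => (p.2, p.1))
      (g := fun (d : PySem.Dict Int (List Int)) q => d.modify q.1 [] (fun l => l ++ [q.2]))]
    rw [PySem.Dict.getD_foldl_modify_append]
    rw [List.filter_map, List.map_map]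
    unfold posl
    simp [Function.comp_def]
  rw [PySem.Dict.items_eq_map_keys _ hnodup []]
  rw [List.foldl_map]
  rw [PySem.List.foldl_congr_mem _ _
    (fun best k => max best (solLoop a k a.length 0 0)) _
    (by
      intro best k _
      simp only
      rw [hgetD k, ← scan_eq_top])]
  rw [hkeys]

lemma keysA_perm (a : List Int) :
    (((PySem.List.sorted (PySem.Dict.counter a).items (fun p => p.2) true).map
      (fun p => p.1))).Perm (PySem.Set.ofList a) := by
  have h1 : ((PySem.Dict.counter a).items.map (fun p => p.1)) = PySem.Set.ofList a := by
    rw [PySem.Dict.items_counter, List.map_map]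
    simp [Function.comp_def]
  have h2 := (PySem.List.sorted_perm (PySem.Dict.counter a).items (fun p => p.2) true).map
    (fun p : Int × Int => p.1)
  rw [h1] at h2
  exact h2

lemma keysA_nodup (a : List Int) :
    (((PySem.List.sorted (PySem.Dict.counter a).items (fun p => p.2) true).map
      (fun p => p.1))).Nodup :=
  ((keysA_perm a).nodup_iff).mpr (PySem.Set.nodup_ofList a)

-- A's program (len ≥ 2 branch) as the same fold over the keys of the sorted counter
lemma a_eq (a : List Int) (h : ¬ a.length ≤ 1) :
    solution a = ((PySem.List.sorted (PySem.Dict.counter a).items (fun p => p.2) true).map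
      (fun p => p.1)).foldl (fun ans i => max ans (solLoop a i a.length 0 0)) 0 := by
  unfold solution solOuter
  rw [if_neg h]
  have hkeysA : ((PySem.List.sorted (PySem.Dict.counter a).items (fun p => p.2) true).foldl
      (fun d p => d.insert p.1 p.2) PySem.Dict.empty).keys
      = (PySem.List.sorted (PySem.Dict.counter a).items (fun p => p.2) true).map (fun p => p.1) := by
    rw [PySem.Dict.keys_foldl_insert_key (PySem.List.sorted (PySem.Dict.counter a).items (fun p => p.2) true) (fun p => p.1) (fun _ p => p.2) PySem.Dict.empty]
    rw [show (PySem.Dict.empty : PySem.Dict Int Int).keys = [] from rfl,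
      PySem.Set.update_nil_left,
      PySem.Set.ofList_eq_self_of_nodup _ (keysA_nodup a)]
  have hitems : ((PySem.List.sorted (PySem.Dict.counter a).items (fun p => p.2) true).foldl
      (fun d p => d.insert p.1 p.2) PySem.Dict.empty).items
      = PySem.List.sorted (PySem.Dict.counter a).items (fun p => p.2) true := by
    rw [PySem.Dict.items_foldl_insert_fresh (PySem.List.sorted (PySem.Dict.counter a).items (fun p => p.2) true) (fun p => p.1) (fun p => p.2) PySem.Dict.empty
      (fun p _ => rfl) (keysA_nodup a)]
    simp [show (PySem.Dict.empty : PySem.Dict Int Int).items = [] from rfl]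
  have hcount : ∀ i ∈ (PySem.List.sorted (PySem.Dict.counter a).items (fun p => p.2) true).map
      (fun p => p.1),
      ((PySem.List.sorted (PySem.Dict.counter a).items (fun p => p.2) true).foldl
        (fun d p => d.insert p.1 p.2) PySem.Dict.empty).getD i 0 = (a.count i : Int) := by
    intro i hi
    obtain ⟨p, hp, rfl⟩ := List.mem_map.mp hi
    have hpitems : p ∈ (PySem.Dict.counter a).items :=
      (PySem.List.mem_sorted _ _ _ _).mp hp
    rw [PySem.Dict.items_counter] at hpitems
    obtain ⟨k, _, rfl⟩ := List.mem_map.mp hpitems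
    have := PySem.Dict.getD_of_mem_items _ (hitems ▸ hp) (hkeysA ▸ keysA_nodup a) (0 : Int)
    rw [this]
  rw [hkeysA]
  rw [PySem.List.foldl_congr_mem _ _
    (fun ans i => if (a.count i : Int) * 2 ≤ ans then ans else max ans (solLoop a i a.length 0 0)) _
    (by
      intro ans i hi
      simp only
      rw [hcount i hi])]
  rw [prune (fun i => solLoop a i a.length 0 0) (fun i => (a.count i : Int) * 2) _ 0
    (fun i _ => by
      show solLoop a i a.length 0 0 ≤ (a.count i : Int) * 2
      have := g_le a i; omega)]

-- ===== VERDICT (by name: the statement is the Claim_ definition above) =====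
theorem solution_spec : Claim_equal_solution := by
  intro a _
  unfold Spec_solution
  by_cases h : a.length ≤ 1
  · have hA : solution a = 0 := by unfold solution; rw [if_pos h]
    rw [hA, alt_eq]
    symm
    apply foldl_max_eq_self
    intro i _
    rw [scan_done a i a.length 0 0 (by omega)]
  · rw [a_eq a h, alt_eq]
    exact foldl_max_perm _ (keysA_perm a) 0
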